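-- pv_equiv track=rewrite | github.com/NTU-SER/speech_utils | speech_utils/IAAN/data_utils.py | generate_interaction_sample
-- ===== SOURCE A (Python) =====
-- def generate_interaction_sample(index_words, emo_dict,
--                                 emo=['ang', 'hap', 'neu', 'sad']):
--     """Generate interaction training samples of pairs "center - target -
--     opposite", where "center" is the current utterance, "target" is the
--     previous utterance of the current speaker, and "opposite" is the previous
--     utterance of the interlocutor.
--
--     Parameters
--     ----------
--     index_words : list
--         Utterance order of the current scene.
--     emo_dict : dict
--         Dictionary of pairs "utt_name:label" generated by `get_label` function.
--     emo : list
--         List of emotions to use. Defaults to ['ang', 'hap', 'neu', 'sad'],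
--         which is used in the original implementation.
--
--     Returns
--     -------
--     tuple
--         Tuple of lists: center utterance names, target utterance names,
--         opposite utterance names, center utterance labels, target utterance
--         labels, opposite utterance labels, distance between center utterance
--         and target utterance, distance between center utterance and opposite
--         utterance.
--
--     """
--     # Utterance names
--     centers, targets, opposites = list(), list(), list()
--     # Utterance labels
--     center_labels, target_labels, opposite_labels = list(), list(), list()
--     # Distances
--     target_dists, opposite_dists = list(), list()
--     # Compatibility
--     emo_dict[None] = None
--
--     for i, center in enumerate(index_words):
--         if emo_dict[center] not in emo:
--             continue
--
--         centers.append(center)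
--         center_labels.append(emo_dict[center])
--         target = None
--         target_dist = None
--         opposite = None
--         opposite_dist = None
--
--         # Traverse up to previous 8 utterances
--         for j in range(min(i, 8)):
--             #  Stop if both are found
--             if target is not None and opposite is not None:
--                 break
--
--             dist = j + 1
--             curr_word = index_words[i - dist]
--             # If it is the same speaker
--             if curr_word[-4] == center[-4]:
--                 if target is None:
--                     target = curr_word
--                     target_dist = dist
--             elif opposite is None:
--                 opposite = curr_word
--                 opposite_dist = dist
--
--         # Update
--         targets.append(target)
--         target_labels.append(emo_dict[target])
--         target_dists.append(target_dist)
--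
--         opposites.append(opposite)
--         opposite_labels.append(emo_dict[opposite])
--         opposite_dists.append(opposite_dist)
--
--     return (centers, targets, opposites, center_labels, target_labels,
--             opposite_labels, target_dists, opposite_dists)
-- ===== SOURCE B (Python) =====
-- def generate_interaction_sample(index_words, emo_dict,
--                                 emo=['ang', 'hap', 'neu', 'sad']):
--     """One forward pass keeping, per speaker character (word[-4]), the index
--     of that speaker's most recent utterance; target/opposite are read off the
--     map instead of re-scanning the previous 8 utterances for every center."""
--     centers, targets, opposites = [], [], []
--     center_labels, target_labels, opposite_labels = [], [], []
--     target_dists, opposite_dists = [], []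
--     # Compatibility (same caller-visible mutation as the original)
--     emo_dict[None] = None
--
--     last_pos = {}
--     for i, word in enumerate(index_words):
--         label = emo_dict[word]
--         if label in emo:
--             spk = word[-4]
--             target, target_dist = None, None
--             tpos = last_pos.get(spk)
--             if tpos is not None and i - tpos <= 8:
--                 target, target_dist = index_words[tpos], i - tpos
--             opposite, opposite_dist = None, None
--             opos = max((p for s, p in last_pos.items() if s != spk),
--                        default=None)
--             if opos is not None and i - opos <= 8:
--                 opposite, opposite_dist = index_words[opos], i - opos
--             centers.append(word)
--             center_labels.append(label)
--             targets.append(target)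
--             target_labels.append(emo_dict[target])
--             target_dists.append(target_dist)
--             opposites.append(opposite)
--             opposite_labels.append(emo_dict[opposite])
--             opposite_dists.append(opposite_dist)
--         last_pos[word[-4]] = i
--
--     return (centers, targets, opposites, center_labels, target_labels,
--             opposite_labels, target_dists, opposite_dists)
-- ===== Notes on version B (the rewrite author's own statement) =====
-- stated objective: alternative
-- what changed: Replaces A's per-center backward scan over the previous min(i,8) utterances (with early break and two search slots) by a single forward pass that maintains a dict from speaker character (word[-4]) to the index of that speaker's most recent utterance; target/opposite and their distances are read off the dict (last position of the same speaker, max position over the other speakers) instead of being re-searched.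
-- outside the precondition, e.g. on generate_interaction_sample(['hap'], {'hap': None}, []): A returns ([], [], [], [], [], [], [], []), B raises IndexError
import Mathlib
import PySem

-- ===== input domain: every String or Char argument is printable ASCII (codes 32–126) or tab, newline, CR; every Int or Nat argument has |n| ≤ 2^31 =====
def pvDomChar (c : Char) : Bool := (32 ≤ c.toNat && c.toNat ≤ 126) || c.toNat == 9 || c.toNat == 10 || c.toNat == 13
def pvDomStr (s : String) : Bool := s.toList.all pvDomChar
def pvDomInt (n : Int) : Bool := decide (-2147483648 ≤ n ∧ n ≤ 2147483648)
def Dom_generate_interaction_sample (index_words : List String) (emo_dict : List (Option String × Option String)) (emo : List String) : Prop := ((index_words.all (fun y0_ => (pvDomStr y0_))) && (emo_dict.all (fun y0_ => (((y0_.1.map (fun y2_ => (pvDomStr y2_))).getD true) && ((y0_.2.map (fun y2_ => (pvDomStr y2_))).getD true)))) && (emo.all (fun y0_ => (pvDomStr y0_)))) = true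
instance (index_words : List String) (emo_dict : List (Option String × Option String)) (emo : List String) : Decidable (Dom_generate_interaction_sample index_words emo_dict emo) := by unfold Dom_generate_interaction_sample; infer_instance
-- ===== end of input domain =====

-- B replaces A's per-center backward scan of the previous 8 utterances by one forward pass
-- with a dict "speaker char (word[-4]) -> index of its latest utterance" (alternative data
-- structure, same results).  Both Pythons mutate emo_dict in place (emo_dict[None] = None);
-- the equivalence proved here is about the RETURN value only (B performs the same mutation).

-- ===== PORT A =====
-- shared helpers (both Pythons compute word[-4], dict(emo_dict) with emo_dict[None] = None):
def pvSpk (w : String) : Option Char := PySem.Str.pyGet? w (-4)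

-- dict lookups are written d.getD k none; on Pre_ every looked-up key is present, so this is
-- exact (Python raises KeyError on a missing key — excluded by Pre_).
def pvDict (emo_dict : List (Option String × Option String)) : PySem.Dict (Option String) (Option String) :=
  (PySem.Dict.ofList emo_dict).insert none none

structure PvAcc where
  cs : List (Option String)
  ts : List (Option String)
  os : List (Option String)
  cls : List (Option String)
  tls : List (Option String)
  ols : List (Option String)
  tds : List (Option Int)
  ods : List (Option Int)
deriving Repr, DecidableEq

def pvAcc0 : PvAcc := ⟨[], [], [], [], [], [], [], []⟩

-- A's inner loop "for j in range(min(i, 8)): …" with the break when both are found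
def pvAScan (words : List String) (center : String) (i : Int) :
    List Int → Option String × Option Int × Option String × Option Int →
    Option String × Option Int × Option String × Option Int
  | [], st => st
  | j :: js, (t, td, o, od) =>
    if t.isSome && o.isSome then (t, td, o, od)
    else
      let dist : Int := j + 1
      let curr : String := PySem.List.pyGetD words (i - dist) ""  -- always in range: 0 ≤ i-dist < i
      if pvSpk curr == pvSpk center then
        if t.isNone then pvAScan words center i js (some curr, some dist, o, od)
        else pvAScan words center i js (t, td, o, od)
      else
        if o.isNone then pvAScan words center i js (t, td, some curr, some dist)
        else pvAScan words center i js (t, td, o, od)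

-- A's loop body, state = (i, output lists)
def pvAStep (words : List String) (d : PySem.Dict (Option String) (Option String)) (emo : List String)
    (acc : Int × PvAcc) (center : String) : Int × PvAcc :=
  let i := acc.1
  let a := acc.2
  if (emo.map some).contains (d.getD (some center) none) then
    let r := pvAScan words center i (PySem.List.pyRange 0 (min i 8) 1) (none, none, none, none)
    let t := r.1
    let td := r.2.1
    let o := r.2.2.1
    let od := r.2.2.2
    (i + 1, { cs := a.cs ++ [some center], cls := a.cls ++ [d.getD (some center) none],
              ts := a.ts ++ [t], tls := a.tls ++ [d.getD t none], tds := a.tds ++ [td],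
              os := a.os ++ [o], ols := a.ols ++ [d.getD o none], ods := a.ods ++ [od] })
  else (i + 1, a)

def generate_interaction_sample (index_words : List String) (emo_dict : List (Option String × Option String)) (emo : List String) : List (Option String) × List (Option String) × List (Option String) × List (Option String) × List (Option String) × List (Option String) × List (Option Int) × List (Option Int) :=
  let d := pvDict emo_dict
  let r := (index_words.foldl (pvAStep index_words d emo) (0, pvAcc0)).2
  (r.cs, r.ts, r.os, r.cls, r.tls, r.ols, r.tds, r.ods)

-- ===== PORT B =====
-- B's loop body, state = (i, output lists, last_pos : speaker char -> latest index)
def pvBStep (words : List String) (d : PySem.Dict (Option String) (Option String)) (emo : List String)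
    (acc : Int × PvAcc × PySem.Dict (Option Char) Int) (word : String) :
    Int × PvAcc × PySem.Dict (Option Char) Int :=
  let i := acc.1
  let a := acc.2.1
  let lp := acc.2.2
  let label := d.getD (some word) none
  let a' :=
    if (emo.map some).contains label then
      let s := pvSpk word
      let tp : Option String × Option Int :=
        match lp.get? s with
        | some p => if i - p ≤ 8 then (some (PySem.List.pyGetD words p ""), some (i - p)) else (none, none)
        | none => (none, none)
      let op : Option String × Option Int :=
        match PySem.List.max? ((lp.items.filter (fun q => !(q.1 == s))).map (·.2)) (fun x => x) with
        | some p => if i - p ≤ 8 then (some (PySem.List.pyGetD words p ""), some (i - p)) else (none, none)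
        | none => (none, none)
      { cs := a.cs ++ [some word], cls := a.cls ++ [label],
        ts := a.ts ++ [tp.1], tls := a.tls ++ [d.getD tp.1 none], tds := a.tds ++ [tp.2],
        os := a.os ++ [op.1], ols := a.ols ++ [d.getD op.1 none], ods := a.ods ++ [op.2] }
    else a
  (i + 1, a', lp.insert (pvSpk word) i)

def generate_interaction_sample_alt (index_words : List String) (emo_dict : List (Option String × Option String)) (emo : List String) : List (Option String) × List (Option String) × List (Option String) × List (Option String) × List (Option String) × List (Option String) × List (Option Int) × List (Option Int) :=
  let d := pvDict emo_dict
  let r := (index_words.foldl (pvBStep index_words d emo) (0, pvAcc0, PySem.Dict.empty)).2.1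
  (r.cs, r.ts, r.os, r.cls, r.tls, r.ols, r.tds, r.ods)

-- ===== PRECONDITION & SPEC =====
-- Pre_ excludes the inputs on which the Python A raises (KeyError: a word of index_words that is
-- not a key of emo_dict; IndexError: word[-4] on a word shorter than 4 chars).  It is slightly
-- wider than A's exact crash set: a short word that is never a kept center and never among the 8
-- utterances before one is harmless to A but B (which reads word[-4] for every word) raises there.
def Pre_generate_interaction_sample (index_words : List String) (emo_dict : List (Option String × Option String)) (emo : List String) : Prop :=
  ∀ w ∈ index_words, 4 ≤ PySem.Str.len w ∧ ∃ p ∈ emo_dict, p.1 = some w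

instance (index_words : List String) (emo_dict : List (Option String × Option String)) (emo : List String) : Decidable (Pre_generate_interaction_sample index_words emo_dict emo) := by unfold Pre_generate_interaction_sample; infer_instance

def pvWitness_generate_interaction_sample : List String × (List (Option String × Option String)) × List String :=
  (["A_M_1", "B_F_1", "A_M_2"],
   [(some "A_M_1", some "ang"), (some "B_F_1", some "hap"), (some "A_M_2", some "neu")],
   ["ang", "hap", "neu", "sad"])

-- DecidableEq of the 8-fold output product (instance synthesis exceeds the default search size)
def pvDecEqOut : DecidableEq (List (Option String) × List (Option String) × List (Option String) × List (Option String) × List (Option String) × List (Option String) × List (Option Int) × List (Option Int)) := fun x y =>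
  decidable_of_iff (x.1 = y.1 ∧ x.2.1 = y.2.1 ∧ x.2.2.1 = y.2.2.1 ∧ x.2.2.2.1 = y.2.2.2.1 ∧ x.2.2.2.2.1 = y.2.2.2.2.1 ∧ x.2.2.2.2.2.1 = y.2.2.2.2.2.1 ∧ x.2.2.2.2.2.2.1 = y.2.2.2.2.2.2.1 ∧ x.2.2.2.2.2.2.2 = y.2.2.2.2.2.2.2) (by simp [Prod.ext_iff])

def Spec_generate_interaction_sample (index_words : List String) (emo_dict : List (Option String × Option String)) (emo : List String) (out : List (Option String) × List (Option String) × List (Option String) × List (Option String) × List (Option String) × List (Option String) × List (Option Int) × List (Option Int)) : Prop := out = generate_interaction_sample_alt index_words emo_dict emo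
instance (index_words : List String) (emo_dict : List (Option String × Option String)) (emo : List String) (out : List (Option String) × List (Option String) × List (Option String) × List (Option String) × List (Option String) × List (Option String) × List (Option Int) × List (Option Int)) : Decidable (Spec_generate_interaction_sample index_words emo_dict emo out) := by unfold Spec_generate_interaction_sample; exact pvDecEqOut _ _

-- ===== CLAIM (what is proved, stated in full; the proofs are below) =====
def Claim_equal_generate_interaction_sample : Prop := ∀ (index_words : List String) (emo_dict : List (Option String × Option String)) (emo : List String), Dom_generate_interaction_sample index_words emo_dict emo → Pre_generate_interaction_sample index_words emo_dict emo → Spec_generate_interaction_sample index_words emo_dict emo (generate_interaction_sample index_words emo_dict emo)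

-- ===== LEMMAS AND PROOFS =====

-- last_pos after processing a prefix, written structurally for the proofs
def pvLpAux : List String → Int → PySem.Dict (Option Char) Int → PySem.Dict (Option Char) Int
  | [], _, lp => lp
  | x :: l, i, lp => pvLpAux l (i + 1) (lp.insert (pvSpk x) i)

def pvLpOf (pre : List String) : PySem.Dict (Option Char) Int :=
  pvLpAux pre 0 PySem.Dict.empty

-- last index j < n with P (speaker of w[j])
def pvLastP (w : List String) (P : Option Char → Bool) : Nat → Option Int
  | 0 => none
  | n + 1 => if P (pvSpk (w.getD n "")) then some (n : Int) else pvLastP w P n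

-- first utterance (with its distance) among the scanned distances whose speaker satisfies P
def pvFind (w : List String) (P : Option Char → Bool) (i : Int) : List Int → Option (String × Int)
  | [] => none
  | j :: js =>
    if P (pvSpk (PySem.List.pyGetD w (i - (j + 1)) "")) then
      some (PySem.List.pyGetD w (i - (j + 1)) "", j + 1)
    else pvFind w P i js

theorem pvLpAux_append (x : String) : ∀ (l : List String) (i : Int) (lp : PySem.Dict (Option Char) Int),
    pvLpAux (l ++ [x]) i lp = (pvLpAux l i lp).insert (pvSpk x) (i + l.length) := by
  intro l
  induction l with
  | nil => intro i lp; simp [pvLpAux]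
  | cons y l ih =>
    intro i lp
    simp only [List.cons_append, pvLpAux, ih]
    congr 1
    simp only [List.length_cons]
    push_cast
    ring

theorem pvLpAux_keys_nodup : ∀ (l : List String) (i : Int) (lp : PySem.Dict (Option Char) Int),
    lp.keys.Nodup → (pvLpAux l i lp).keys.Nodup := by
  intro l
  induction l with
  | nil => intro i lp h; exact h
  | cons y l ih => intro i lp h; exact ih _ _ (PySem.Dict.nodup_keys_insert _ _ _ h)

theorem pvLpOf_keys_nodup (pre : List String) : (pvLpOf pre).keys.Nodup :=
  pvLpAux_keys_nodup pre 0 _ PySem.Dict.nodup_keys_empty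

theorem pvLpOf_get? (w : List String) : ∀ (n : Nat), n ≤ w.length → ∀ (s : Option Char),
    (pvLpOf (w.take n)).get? s = pvLastP w (fun c => c == s) n := by
  intro n
  induction n with
  | zero => intro _ s; simp [pvLpOf, pvLpAux, pvLastP, PySem.Dict.get?_empty]
  | succ n ih =>
    intro hn s
    have hlt : n < w.length := hn
    have htake : w.take (n + 1) = w.take n ++ [w[n]] := by
      rw [List.take_succ]
      simp [List.getElem?_eq_getElem hlt]
    rw [htake]
    show (pvLpAux (w.take n ++ [w[n]]) 0 PySem.Dict.empty).get? s = _
    rw [pvLpAux_append]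
    rw [PySem.Dict.get?_insert]
    have hlen : (0 : Int) + ((w.take n).length : Int) = (n : Int) := by
      simp [List.length_take, Nat.min_eq_left (Nat.le_of_lt hlt)]
    simp only [pvLastP, List.getD_eq_getElem w "" hlt]
    rcases eq_or_ne s (pvSpk w[n]) with h | h
    · rw [if_pos h, hlen, h]
      simp
    · have h' : (pvSpk w[n] == s) = false := by
        simp [beq_eq_false_iff_ne]
        exact fun hc => h hc.symm
      simp only [h', if_neg h, if_false, Bool.false_eq_true]
      exact ih (Nat.le_of_lt hlt) s

theorem pvLastP_bounds (w : List String) (P : Option Char → Bool) :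
    ∀ (n : Nat) (p : Int), pvLastP w P n = some p →
      0 ≤ p ∧ p < (n : Int) ∧ P (pvSpk (w.getD p.toNat "")) = true := by
  intro n
  induction n with
  | zero => intro p h; simp [pvLastP] at h
  | succ n ih =>
    intro p h
    simp only [pvLastP] at h
    split_ifs at h with hc
    · cases h
      refine ⟨by positivity, by push_cast; omega, by simpa using hc⟩
    · obtain ⟨h1, h2, h3⟩ := ih p h
      refine ⟨h1, by push_cast; push_cast at h2; omega, h3⟩

theorem pvLastP_max (w : List String) (P : Option Char → Bool) :
    ∀ (n : Nat) (p : Int), pvLastP w P n = some p →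
      ∀ (j : Nat), j < n → p < (j : Int) → P (pvSpk (w.getD j "")) = false := by
  intro n
  induction n with
  | zero => intro p h; simp [pvLastP] at h
  | succ n ih =>
    intro p h j hj hpj
    simp only [pvLastP] at h
    split_ifs at h with hc
    · exfalso
      injection h with h'
      omega
    · rcases Nat.lt_or_ge j n with hjn | hjn
      · exact ih p h j hjn hpj
      · have hje : j = n := by omega
        subst hje
        simpa using hc

theorem pvLastP_none (w : List String) (P : Option Char → Bool) :
    ∀ (n : Nat), pvLastP w P n = none →
      ∀ (j : Nat), j < n → P (pvSpk (w.getD j "")) = false := by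
  intro n
  induction n with
  | zero => intro _ j hj; omega
  | succ n ih =>
    intro h j hj
    simp only [pvLastP] at h
    by_cases hc : P (pvSpk (w.getD n "")) = true
    · rw [if_pos hc] at h
      exact (Option.some_ne_none _ h).elim
    · rw [if_neg hc] at h
      rcases Nat.lt_or_ge j n with hjn | hjn
      · exact ih h j hjn
      · have hje : j = n := by omega
        subst hje
        simpa using hc

theorem pvLastP_of_mem (w : List String) (P : Option Char → Bool) :
    ∀ (n : Nat) (j : Nat), j < n → P (pvSpk (w.getD j "")) = true →
      ∃ p, pvLastP w P n = some p ∧ (j : Int) ≤ p := by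
  intro n
  induction n with
  | zero => intro j hj; omega
  | succ n ih =>
    intro j hj hP
    simp only [pvLastP]
    split_ifs with hc
    · exact ⟨(n : Int), rfl, by push_cast; omega⟩
    · rcases Nat.lt_or_ge j n with hjn | hjn
      · exact ih j hjn hP
      · have hje : j = n := by omega
        subst hje
        rw [hP] at hc
        simp at hc

theorem pvFind_pyRange (w : List String) (P : Option Char → Bool) :
    ∀ (m a n k : Nat), k = a + m → k ≤ n →
      pvFind w P (n : Int) (PySem.List.pyRange (a : Int) (k : Int) 1) =
        (match pvLastP w P (n - a) with
         | some p => if (n : Int) - (k : Int) ≤ p then some (w.getD p.toNat "", (n : Int) - p) else none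
         | none => none) := by
  intro m
  induction m with
  | zero =>
    intro a n k hk hkn
    have hka : a = k := by omega
    subst hka
    rw [PySem.List.pyRange_one_eq_nil (by simp)]
    simp only [pvFind]
    cases h : pvLastP w P (n - a) with
    | none => rfl
    | some p =>
      obtain ⟨h1, h2, _⟩ := pvLastP_bounds w P _ _ h
      have hlt : ¬ ((n : Int) - ((a : Nat) : Int) ≤ p) := by omega
      simp [hlt]
  | succ m ih =>
    intro a n k hk hkn
    have ha : a < n := by omega
    have hcons : PySem.List.pyRange (a : Int) (k : Int) 1 = (a : Int) :: PySem.List.pyRange ((a : Int) + 1) (k : Int) 1 :=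
      PySem.List.pyRange_one_cons (by push_cast; omega)
    rw [hcons]
    simp only [pvFind]
    have hidx : (n : Int) - ((a : Int) + 1) = ((n - a - 1 : Nat) : Int) := by push_cast; omega
    have hgd : PySem.List.pyGetD w ((n : Int) - ((a : Int) + 1)) "" = w.getD (n - a - 1) "" := by
      rw [hidx, PySem.List.pyGetD_natCast]
    have hna : n - a = (n - a - 1) + 1 := by omega
    rw [hgd, hna]
    simp only [pvLastP]
    by_cases hP : P (pvSpk (w.getD (n - a - 1) "")) = true
    · have hc : (n : Int) - (k : Int) ≤ ((n - a - 1 : Nat) : Int) := by push_cast; omega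
      have hv : (n : Int) - ((n - a - 1 : Nat) : Int) = (a : Int) + 1 := by push_cast; omega
      have hP2 : P (pvSpk (w[n - a - 1]?.getD "")) = true := hP
      simp [hP2, hc, hv]
    · have hP' : P (pvSpk (w.getD (n - a - 1) "")) = false := by simpa using hP
      have hP2 : P (pvSpk (w[n - a - 1]?.getD "")) = false := hP'
      rw [if_neg (by simp [hP2]), if_neg (by simp [hP2])]
      have h1 : (a : Int) + 1 = ((a + 1 : Nat) : Int) := by push_cast; ring
      rw [h1, ih (a + 1) n k (by omega) hkn]
      have h2 : n - (a + 1) = n - a - 1 := by omega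
      rw [h2]

theorem pvAScan_eq (w : List String) (center : String) (i : Int) :
    ∀ (ds : List Int) (t : Option String) (td : Option Int) (o : Option String) (od : Option Int),
      (t = none → td = none) → (o = none → od = none) →
      pvAScan w center i ds (t, td, o, od) =
        ((if t.isSome then t else (pvFind w (fun c => c == pvSpk center) i ds).map (·.1)),
         (if t.isSome then td else (pvFind w (fun c => c == pvSpk center) i ds).map (·.2)),
         (if o.isSome then o else (pvFind w (fun c => !(c == pvSpk center)) i ds).map (·.1)),
         (if o.isSome then od else (pvFind w (fun c => !(c == pvSpk center)) i ds).map (·.2))) := by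
  intro ds
  induction ds with
  | nil =>
    intro t td o od htd hod
    cases t with
    | some tv =>
      cases o with
      | some ov => simp [pvAScan]
      | none => simp [pvAScan, pvFind, hod rfl]
    | none =>
      cases o with
      | some ov => simp [pvAScan, pvFind, htd rfl]
      | none => simp [pvAScan, pvFind, htd rfl, hod rfl]
  | cons j js ih =>
    intro t td o od htd hod
    simp only [pvAScan, pvFind]
    by_cases hP : (pvSpk (PySem.List.pyGetD w (i - (j + 1)) "") == pvSpk center) = true
    · cases t with
      | some tv =>
        cases o with
        | some ov => simp [hP]
        | none =>
          rw [ih (some tv) td none od (fun h => by cases h) hod]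
          simp [hP]
      | none =>
        rw [ih (some (PySem.List.pyGetD w (i - (j + 1)) "")) (some (j + 1)) o od
          (fun h => by cases h) hod]
        simp [hP]
    · have hP' : (pvSpk (PySem.List.pyGetD w (i - (j + 1)) "") == pvSpk center) = false := by
        simpa using hP
      cases o with
      | some ov =>
        cases t with
        | some tv => simp [hP']
        | none =>
          rw [ih none td (some ov) od htd (fun h => by cases h)]
          simp [hP']
      | none =>
        rw [ih t td (some (PySem.List.pyGetD w (i - (j + 1)) "")) (some (j + 1)) htd
          (fun h => by cases h)]
        simp [hP']

theorem pvAScan_eq0 (w : List String) (center : String) (i : Int) (ds : List Int) :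
    pvAScan w center i ds (none, none, none, none) =
      ((pvFind w (fun c => c == pvSpk center) i ds).map (·.1),
       (pvFind w (fun c => c == pvSpk center) i ds).map (·.2),
       (pvFind w (fun c => !(c == pvSpk center)) i ds).map (·.1),
       (pvFind w (fun c => !(c == pvSpk center)) i ds).map (·.2)) := by
  rw [pvAScan_eq w center i ds none none none none (fun _ => rfl) (fun _ => rfl)]
  simp

theorem pvMaxItems (w : List String) (n : Nat) (hn : n ≤ w.length) (s : Option Char) :
    PySem.List.max? (((pvLpOf (w.take n)).items.filter (fun q => !(q.1 == s))).map (·.2)) (fun x => x)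
      = pvLastP w (fun c => !(c == s)) n := by
  have hnd := pvLpOf_keys_nodup (w.take n)
  have hmem : ∀ (p : Int),
      p ∈ ((pvLpOf (w.take n)).items.filter (fun q => !(q.1 == s))).map (·.2) ↔
        ∃ k : Option Char, (k == s) = false ∧ pvLastP w (fun c => c == k) n = some p := by
    intro p
    constructor
    · intro hp
      obtain ⟨q, hq, hq2⟩ := List.mem_map.mp hp
      obtain ⟨hqi, hqf⟩ := List.mem_filter.mp hq
      refine ⟨q.1, by simpa using hqf, ?_⟩
      have hg := (PySem.Dict.get?_eq_some_iff_mem_items (pvLpOf (w.take n)) q.1 q.2 hnd).mpr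
        (by rw [← Prod.mk.eta (p := q)] at hqi; exact hqi)
      rw [pvLpOf_get? w n hn q.1] at hg
      rw [hg, hq2]
    · rintro ⟨k, hk, hlast⟩
      rw [← pvLpOf_get? w n hn k] at hlast
      have hitem := (PySem.Dict.get?_eq_some_iff_mem_items (pvLpOf (w.take n)) k p hnd).mp hlast
      exact List.mem_map.mpr ⟨(k, p), List.mem_filter.mpr ⟨hitem, by simpa using hk⟩, rfl⟩
  cases h : pvLastP w (fun c => !(c == s)) n with
  | none =>
    rw [PySem.List.max?_eq_none_iff]
    rw [List.eq_nil_iff_forall_not_mem]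
    intro p hp
    obtain ⟨k, hk, hlast⟩ := (hmem p).mp hp
    obtain ⟨h1, h2, h3⟩ := pvLastP_bounds w _ _ _ hlast
    have hj : p.toNat < n := by omega
    have hno := pvLastP_none w _ _ h p.toNat hj
    rw [beq_iff_eq] at h3
    rw [h3] at hno
    simp [hk] at hno
  | some m =>
    obtain ⟨hm0, hmn, hmP⟩ := pvLastP_bounds w _ _ _ h
    have hks : ((pvSpk (w.getD m.toNat "")) == s) = false := by simpa using hmP
    have hlastks : pvLastP w (fun c => c == pvSpk (w.getD m.toNat "")) n = some m := by
      obtain ⟨p, hp, hple⟩ := pvLastP_of_mem w (fun c => c == pvSpk (w.getD m.toNat "")) n m.toNat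
        (by omega) (by simp)
      obtain ⟨hp0, hpn, hpP⟩ := pvLastP_bounds w _ _ _ hp
      have hple' : m ≤ p := by
        rw [Int.toNat_of_nonneg hm0] at hple
        exact hple
      have hpm : p ≤ m := by
        by_contra hgt
        push_neg at hgt
        have hmx := pvLastP_max w (fun c => !(c == s)) n m h p.toNat (by omega)
          (by rw [Int.toNat_of_nonneg hp0]; omega)
        rw [beq_iff_eq] at hpP
        rw [hpP] at hmx
        simp at hmx
        exact absurd hmx (by simpa using hks)
      have hpe : p = m := le_antisymm hpm hple'
      rw [hpe] at hp
      exact hp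
    have hmemm : m ∈ ((pvLpOf (w.take n)).items.filter (fun q => !(q.1 == s))).map (·.2) :=
      (hmem m).mpr ⟨pvSpk (w.getD m.toNat ""), hks, hlastks⟩
    have hub : ∀ x ∈ ((pvLpOf (w.take n)).items.filter (fun q => !(q.1 == s))).map (·.2), x ≤ m := by
      intro x hx
      obtain ⟨k, hk, hlast⟩ := (hmem x).mp hx
      obtain ⟨hx0, hxn, hxP⟩ := pvLastP_bounds w _ _ _ hlast
      by_contra hgt
      push_neg at hgt
      have hmx := pvLastP_max w (fun c => !(c == s)) n m h x.toNat (by omega)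
        (by rw [Int.toNat_of_nonneg hx0]; omega)
      rw [beq_iff_eq] at hxP
      rw [hxP] at hmx
      simp [hk] at hmx
    cases hmx : PySem.List.max? ((((pvLpOf (w.take n)).items.filter (fun q => !(q.1 == s))).map (·.2))) (fun x => x) with
    | none =>
      rw [PySem.List.max?_eq_none_iff] at hmx
      rw [hmx] at hmemm
      simp at hmemm
    | some m' =>
      have h1 := PySem.List.max?_mem hmx
      have h2 := PySem.List.max?_isMax hmx m hmemm
      have h3 := hub m' h1
      rw [le_antisymm h3 h2]

theorem pvStep_eq (w : List String) (d : PySem.Dict (Option String) (Option String)) (emo : List String)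
    (x : String) (n : Nat) (hn : n ≤ w.length) (a : PvAcc) :
    pvAStep w d emo ((n : Int), a) x =
      ((pvBStep w d emo ((n : Int), a, pvLpOf (w.take n)) x).1,
       (pvBStep w d emo ((n : Int), a, pvLpOf (w.take n)) x).2.1) := by
  simp only [pvAStep, pvBStep]
  by_cases he : ((emo.map some).contains (d.getD (some x) none)) = true
  · simp only [he, if_true]
    rw [pvAScan_eq0]
    have hmin : min ((n : Nat) : Int) 8 = ((min n 8 : Nat) : Int) := by push_cast; ring
    have h0 : (0 : Int) = ((0 : Nat) : Int) := rfl
    have hgd : ∀ p : Int, 0 ≤ p → p < (n : Int) → PySem.List.pyGetD w p "" = w.getD p.toNat "" := by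
      intro p h1 h2
      have hlt : p.toNat < w.length := by omega
      rw [PySem.List.pyGetD_eq_getElem w "" h1 (by push_cast; omega), List.getD_eq_getElem w "" hlt]
    have key : ∀ P : Option Char → Bool,
        pvFind w P ((n : Nat) : Int) (PySem.List.pyRange 0 (min ((n : Nat) : Int) 8) 1) =
          (match pvLastP w P n with
           | some p => if ((n : Nat) : Int) - p ≤ 8 then some (w.getD p.toNat "", ((n : Nat) : Int) - p) else none
           | none => none) := by
      intro P
      rw [hmin, h0, pvFind_pyRange w P (min n 8) 0 n (min n 8) (by omega) (by omega)]
      have hsub : n - 0 = n := by omega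
      rw [hsub]
      cases hl : pvLastP w P n with
      | none => rfl
      | some p =>
        obtain ⟨h1, h2, _⟩ := pvLastP_bounds w P n p hl
        have hiff : (((n : Nat) : Int) - ((min n 8 : Nat) : Int) ≤ p) ↔ (((n : Nat) : Int) - p ≤ 8) := by
          push_cast
          omega
        exact if_congr hiff rfl rfl
    rw [key (fun c => c == pvSpk x), key (fun c => !(c == pvSpk x))]
    rw [pvLpOf_get? w n hn (pvSpk x), pvMaxItems w n hn (pvSpk x)]
    cases hts : pvLastP w (fun c => c == pvSpk x) n with
    | none =>
      cases hos : pvLastP w (fun c => !(c == pvSpk x)) n with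
      | none => simp
      | some q =>
        obtain ⟨hq0, hqn, _⟩ := pvLastP_bounds w _ _ _ hos
        by_cases hc : ((n : Nat) : Int) - q ≤ 8 <;> simp [hc, hgd q hq0 hqn]
    | some p =>
      obtain ⟨hp0, hpn, _⟩ := pvLastP_bounds w _ _ _ hts
      cases hos : pvLastP w (fun c => !(c == pvSpk x)) n with
      | none => by_cases hc : ((n : Nat) : Int) - p ≤ 8 <;> simp [hc, hgd p hp0 hpn]
      | some q =>
        obtain ⟨hq0, hqn, _⟩ := pvLastP_bounds w _ _ _ hos
        by_cases hc : ((n : Nat) : Int) - p ≤ 8 <;> by_cases hcq : ((n : Nat) : Int) - q ≤ 8 <;>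
          simp [hc, hcq, hgd p hp0 hpn, hgd q hq0 hqn]
  · simp only [he, if_false, Bool.false_eq_true]

theorem pvFold_eq (w : List String) (d : PySem.Dict (Option String) (Option String)) (emo : List String) :
    ∀ (suf pre : List String) (a : PvAcc), w = pre ++ suf →
      (suf.foldl (pvAStep w d emo) ((pre.length : Int), a)).2 =
      (suf.foldl (pvBStep w d emo) ((pre.length : Int), a, pvLpOf pre)).2.1 := by
  intro suf
  induction suf with
  | nil => intro pre a _; rfl
  | cons x suf ih =>
    intro pre a hw
    have hn : pre.length ≤ w.length := by rw [hw]; simp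
    have htake : w.take pre.length = pre := by rw [hw, List.take_left]
    simp only [List.foldl_cons]
    have hstep := pvStep_eq w d emo x pre.length hn a
    rw [htake] at hstep
    have hlen : (((pre ++ [x]).length : Nat) : Int) = (pre.length : Int) + 1 := by
      simp [List.length_append]
    have hlp : pvLpOf (pre ++ [x]) = (pvLpOf pre).insert (pvSpk x) (pre.length : Int) := by
      show pvLpAux (pre ++ [x]) 0 _ = _
      rw [pvLpAux_append]
      norm_num
      rfl
    have hB1 : (pvBStep w d emo ((pre.length : Int), a, pvLpOf pre) x).1 = (pre.length : Int) + 1 := rfl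
    have hB3 : (pvBStep w d emo ((pre.length : Int), a, pvLpOf pre) x).2.2
        = (pvLpOf pre).insert (pvSpk x) (pre.length : Int) := rfl
    have hA : pvAStep w d emo ((pre.length : Int), a) x
        = (((pre ++ [x]).length : Int), (pvBStep w d emo ((pre.length : Int), a, pvLpOf pre) x).2.1) := by
      rw [hstep, hB1, hlen]
    have hBfull : pvBStep w d emo ((pre.length : Int), a, pvLpOf pre) x
        = (((pre ++ [x]).length : Int), (pvBStep w d emo ((pre.length : Int), a, pvLpOf pre) x).2.1,
           pvLpOf (pre ++ [x])) := by
      rw [hlp, hlen]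
      exact Prod.ext hB1 (Prod.ext rfl hB3)
    rw [hA, hBfull]
    exact ih (pre ++ [x]) (pvBStep w d emo ((pre.length : Int), a, pvLpOf pre) x).2.1
      (by rw [hw, List.append_assoc]; rfl)


-- ===== VERDICT (by name: the statement is the Claim_ definition above) =====
theorem generate_interaction_sample_spec : Claim_equal_generate_interaction_sample := by
  intro index_words emo_dict emo _ _
  unfold Spec_generate_interaction_sample generate_interaction_sample generate_interaction_sample_alt
  have hlp : pvLpOf ([] : List String) = PySem.Dict.empty := rfl
  have h := pvFold_eq index_words (pvDict emo_dict) emo index_words [] pvAcc0 rfl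
  simp only [List.length_nil, Nat.cast_zero, hlp] at h
  simp only [h]
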